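-- pv_equiv track=rewrite | github.com/jcraig949jfi/Prometheus | cartography/shared/scripts/v2/genus2_c2_extend.py | count_fp2_infinity
-- ===== SOURCE A (Python) =====
-- class Fp2:
--     """Element of F_{p^2} = F_p[omega] / (omega^2 - g) where g is a non-residue."""
--     __slots__ = ('a', 'b', 'p', 'g')
--
--     def __init__(self, a, b, p, g):
--         self.a = a % p
--         self.b = b % p
--         self.p = p
--         self.g = g
--
--     def __add__(self, other):
--         return Fp2((self.a + other.a) % self.p, (self.b + other.b) % self.p, self.p, self.g)
--
--     def __sub__(self, other):
--         return Fp2((self.a - other.a) % self.p, (self.b - other.b) % self.p, self.p, self.g)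
--
--     def __mul__(self, other):
--         # (a1 + b1*w)(a2 + b2*w) = (a1*a2 + g*b1*b2) + (a1*b2 + a2*b1)*w
--         p = self.p
--         return Fp2(
--             (self.a * other.a + self.g * self.b * other.b) % p,
--             (self.a * other.b + self.b * other.a) % p,
--             p, self.g
--         )
--
--     def __pow__(self, n):
--         if n == 0:
--             return Fp2(1, 0, self.p, self.g)
--         if n == 1:
--             return self
--         result = Fp2(1, 0, self.p, self.g)
--         base = self
--         while n > 0:
--             if n & 1:
--                 result = result * base
--             base = base * base
--             n >>= 1
--         return result
--
--     def is_zero(self):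
--         return self.a == 0 and self.b == 0
--
--     def is_square(self):
--         """Check if element is a square in F_{p^2}. Uses Euler criterion."""
--         if self.is_zero():
--             return True
--         # Element z is a square in F_{p^2}* iff z^{(p^2-1)/2} = 1
--         exp = (self.p * self.p - 1) // 2
--         result = self ** exp
--         return result.a == 1 and result.b == 0
--
--     def norm(self):
--         """Norm to F_p: N(a + b*w) = a^2 - g*b^2."""
--         return (self.a * self.a - self.g * self.b * self.b) % self.p
--
-- def count_fp2_infinity(f_coeffs, h_coeffs, p, g):
--     """Count points at infinity over F_{p^2}."""
--     deg_f = max(f_coeffs.keys()) if f_coeffs else 0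
--     deg_h = max(h_coeffs.keys()) if h_coeffs else 0
--     eff_deg = max(deg_f, 2 * deg_h)
--
--     if eff_deg % 2 == 1:
--         return 1
--
--     # Leading coefficient of 4f + h^2 at degree eff_deg
--     lead_4f = 4 * f_coeffs.get(eff_deg, 0)
--     lead_h2 = 0
--     for i, ci in h_coeffs.items():
--         j = eff_deg - i
--         if j in h_coeffs:
--             lead_h2 += ci * h_coeffs[j]
--     lead_g_val = lead_4f + lead_h2
--
--     if lead_g_val == 0:
--         return 0
--
--     # Check if leading coeff is a square in F_{p^2}
--     lv = Fp2(lead_g_val % p, 0, p, g)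
--     if lv.is_zero():
--         return 1
--     elif lv.is_square():
--         return 2
--     else:
--         return 0
-- ===== SOURCE B (Python) =====
-- def count_fp2_infinity(f_coeffs, h_coeffs, p, g):
--     """Count points at infinity over F_{p^2}.
--
--     Works on plain integers mod p (the tested element has no omega part, so the
--     whole F_{p^2} algebra is unnecessary) and evaluates the Euler criterion with
--     a recursive most-significant-bit-first modular exponentiation.
--     """
--     def powmod(c, n, m):
--         if n <= 0:
--             return 1 % m
--         t = powmod(c, n // 2, m)
--         t = t * t % m
--         return t * c % m if n % 2 else t
--
--     eff_deg = max(max(f_coeffs, default=0), 2 * max(h_coeffs, default=0))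
--     if eff_deg % 2:
--         return 1
--     lead = 4 * f_coeffs.get(eff_deg, 0) + sum(
--         ci * h_coeffs[eff_deg - i] for i, ci in h_coeffs.items() if eff_deg - i in h_coeffs
--     )
--     if lead == 0:
--         return 0
--     c = lead % p
--     if c == 0:
--         return 1
--     return 2 if powmod(c, (p * p - 1) // 2, p) == 1 else 0
-- ===== Notes on version B (the rewrite author's own statement) =====
-- stated objective: alternative
-- what changed: B drops A's 2-dimensional Fp2 extension-field algebra (operator-overloaded class) and its iterative least-significant-bit-first square-and-multiply loop: the tested element has no omega part, so B evaluates the Euler criterion on plain integers mod p with a recursive most-significant-bit-first exponentiation, and computes the degree/leading-coefficient bookkeeping by max(..., default=0) and a sum comprehension.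
-- outside the precondition, e.g. on count_fp2_infinity({1: 1}, {}, 0, 2): A returns 1, B returns 1
import Mathlib
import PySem

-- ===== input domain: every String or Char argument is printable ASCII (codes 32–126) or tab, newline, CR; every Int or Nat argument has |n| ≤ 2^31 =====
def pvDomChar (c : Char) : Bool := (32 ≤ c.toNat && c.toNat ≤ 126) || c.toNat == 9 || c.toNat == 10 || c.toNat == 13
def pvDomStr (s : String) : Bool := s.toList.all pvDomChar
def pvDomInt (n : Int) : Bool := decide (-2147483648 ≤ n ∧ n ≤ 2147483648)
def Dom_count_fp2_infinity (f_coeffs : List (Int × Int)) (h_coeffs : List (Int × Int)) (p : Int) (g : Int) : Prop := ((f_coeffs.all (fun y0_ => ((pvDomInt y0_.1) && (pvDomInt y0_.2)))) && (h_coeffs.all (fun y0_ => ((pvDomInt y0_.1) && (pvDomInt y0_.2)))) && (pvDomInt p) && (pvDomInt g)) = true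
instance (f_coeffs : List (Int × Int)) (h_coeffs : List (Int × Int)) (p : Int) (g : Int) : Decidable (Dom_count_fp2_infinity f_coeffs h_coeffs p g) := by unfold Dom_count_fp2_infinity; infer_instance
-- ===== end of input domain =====

-- B drops A's Fp2 extension-field algebra and its iterative LSB-first square-and-multiply:
-- the tested element has no omega part, so B works on plain integers mod p with a recursive
-- MSB-first modular exponentiation (alternative decomposition, same cost).

-- ===== PORT A =====

structure PyFp2 where
  a : Int
  b : Int
  p : Int
  g : Int
deriving DecidableEq

-- Fp2.__init__ : both coordinates are reduced mod p
def pyFp2Init (a b p g : Int) : PyFp2 :=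
  { a := PySem.Int.mod a p, b := PySem.Int.mod b p, p := p, g := g }

-- Fp2.__mul__
def pyFp2Mul (x y : PyFp2) : PyFp2 :=
  pyFp2Init (x.a * y.a + x.g * x.b * y.b) (x.a * y.b + x.b * y.a) x.p x.g

-- termination helper for the 'while n > 0' loop of Fp2.__pow__ (cited in decreasing_by)
theorem pvShiftRight_one_eq (n : Int) (h : 0 ≤ n) : n >>> (1:Nat) = n / 2 := by
  rcases n with m | m
  · rw [show Int.ofNat m >>> (1:Nat) = Int.ofNat (m >>> 1) from rfl, Nat.shiftRight_eq_div_pow]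
    rw [show Int.ofNat (m / 2 ^ 1) = ((m / 2 ^ 1 : Nat) : Int) from rfl]
    rw [show Int.ofNat m = ((m : Nat) : Int) from rfl]
    rw [show ((m / 2 ^ 1 : Nat) : Int) = ((m / 2 : Nat) : Int) from by norm_num]
    exact Nat.ToInt.div_congr rfl rfl
  · omega

theorem pyShiftRight_one_toNat_lt (n : Int) (h : 0 < n) : (n >>> (1:Nat)).toNat < n.toNat := by
  rw [pvShiftRight_one_eq n (by omega)]
  omega

-- the 'while n > 0' loop of Fp2.__pow__  (n & 1 → PySem.Int.band, n >>= 1 → >>> per PySem)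
def pyFp2PowLoop (result base : PyFp2) (n : Int) : PyFp2 :=
  if h : 0 < n then
    pyFp2PowLoop (if PySem.Int.band n 1 ≠ 0 then pyFp2Mul result base else result)
      (pyFp2Mul base base) (n >>> (1:Nat))
  else result
termination_by n.toNat
decreasing_by exact pyShiftRight_one_toNat_lt n h

-- Fp2.__pow__
def pyFp2Pow (x : PyFp2) (n : Int) : PyFp2 :=
  if n = 0 then pyFp2Init 1 0 x.p x.g
  else if n = 1 then x
  else pyFp2PowLoop (pyFp2Init 1 0 x.p x.g) x n

-- Fp2.is_zero
def pyFp2IsZero (x : PyFp2) : Bool := x.a == 0 && x.b == 0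

-- Fp2.is_square
def pyFp2IsSquare (x : PyFp2) : Bool :=
  if pyFp2IsZero x then true
  else
    let exp := PySem.Int.floordiv (x.p * x.p - 1) 2
    let result := pyFp2Pow x exp
    result.a == 1 && result.b == 0

def count_fp2_infinity (f_coeffs : List (Int × Int)) (h_coeffs : List (Int × Int)) (p : Int) (g : Int) : Int :=
  let fd := PySem.Dict.ofList f_coeffs
  let hd := PySem.Dict.ofList h_coeffs
  let deg_f := if fd.size ≠ 0 then (PySem.List.max? fd.keys (fun k => k)).getD 0 else 0
  let deg_h := if hd.size ≠ 0 then (PySem.List.max? hd.keys (fun k => k)).getD 0 else 0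
  let eff_deg := max deg_f (2 * deg_h)
  if PySem.Int.mod eff_deg 2 = 1 then 1
  else
    let lead_4f := 4 * PySem.Dict.getD fd eff_deg 0
    -- for i, ci in h_coeffs.items(): if (eff_deg - i) in h_coeffs: lead_h2 += ci * h_coeffs[eff_deg - i]
    -- (h_coeffs[j] ported as getD under the membership guard, where it is exact)
    let lead_h2 := hd.items.foldl (fun acc ici =>
      if hd.contains (eff_deg - ici.1) then acc + ici.2 * PySem.Dict.getD hd (eff_deg - ici.1) 0 else acc) 0
    let lead_g_val := lead_4f + lead_h2
    if lead_g_val = 0 then 0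
    else
      let lv := pyFp2Init (PySem.Int.mod lead_g_val p) 0 p g
      if pyFp2IsZero lv then 1
      else if pyFp2IsSquare lv then 2
      else 0

-- ===== PORT B =====

-- termination helper for powmod's recursion on n // 2 (cited in decreasing_by)
theorem pvFloordivTwo_toNat_lt (n : Int) (h : 0 < n) : (PySem.Int.floordiv n 2).toNat < n.toNat := by
  rw [PySem.Int.floordiv_eq_ediv_of_pos (by omega)]
  omega

-- Source B's recursive MSB-first powmod (the n ≤ 0 base case is literal: 'if n <= 0: return 1 % m')
def bPowMod (c n m : Int) : Int :=
  if h : n ≤ 0 then PySem.Int.mod 1 m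
  else
    let t := bPowMod c (PySem.Int.floordiv n 2) m
    let t2 := PySem.Int.mod (t * t) m
    if PySem.Int.mod n 2 ≠ 0 then PySem.Int.mod (t2 * c) m else t2
termination_by n.toNat
decreasing_by exact pvFloordivTwo_toNat_lt n (by omega)

def count_fp2_infinity_alt (f_coeffs : List (Int × Int)) (h_coeffs : List (Int × Int)) (p : Int) (g : Int) : Int :=
  let fd := PySem.Dict.ofList f_coeffs
  let hd := PySem.Dict.ofList h_coeffs
  let eff_deg := max (PySem.List.maxD fd.keys (fun k => k) 0) (2 * PySem.List.maxD hd.keys (fun k => k) 0)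
  if PySem.Int.mod eff_deg 2 ≠ 0 then 1
  else
    let lead := 4 * PySem.Dict.getD fd eff_deg 0 +
      (hd.items.filterMap (fun ici =>
        if hd.contains (eff_deg - ici.1) then some (ici.2 * PySem.Dict.getD hd (eff_deg - ici.1) 0) else none)).sum
    if lead = 0 then 0
    else
      let c := PySem.Int.mod lead p
      if c = 0 then 1
      else if bPowMod c (PySem.Int.floordiv (p * p - 1) 2) p = 1 then 2 else 0

-- ===== PRECONDITION & SPEC =====
-- Pre_ excludes only p = 0, where both Pythons raise ZeroDivisionError whenever the leading
-- coefficient of 4f + h^2 is nonzero at an even effective degree (on the remaining p = 0 inputs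
-- both return the same value before ever touching p).
def Pre_count_fp2_infinity (f_coeffs : List (Int × Int)) (h_coeffs : List (Int × Int)) (p : Int) (g : Int) : Prop := p ≠ 0
instance (f_coeffs : List (Int × Int)) (h_coeffs : List (Int × Int)) (p : Int) (g : Int) : Decidable (Pre_count_fp2_infinity f_coeffs h_coeffs p g) := by unfold Pre_count_fp2_infinity; infer_instance

def pvWitness_count_fp2_infinity : (List (Int × Int)) × (List (Int × Int)) × Int × Int := ([(2, 1)], [], 7, 3)

def Spec_count_fp2_infinity (f_coeffs : List (Int × Int)) (h_coeffs : List (Int × Int)) (p : Int) (g : Int) (out : Int) : Prop := out = count_fp2_infinity_alt f_coeffs h_coeffs p g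
instance (f_coeffs : List (Int × Int)) (h_coeffs : List (Int × Int)) (p : Int) (g : Int) (out : Int) : Decidable (Spec_count_fp2_infinity f_coeffs h_coeffs p g out) := by unfold Spec_count_fp2_infinity; infer_instance

-- ===== CLAIM (what is proved, stated in full; the proofs are below) =====
def Claim_equal_count_fp2_infinity : Prop := ∀ (f_coeffs : List (Int × Int)) (h_coeffs : List (Int × Int)) (p : Int) (g : Int), Dom_count_fp2_infinity f_coeffs h_coeffs p g → Pre_count_fp2_infinity f_coeffs h_coeffs p g → Spec_count_fp2_infinity f_coeffs h_coeffs p g (count_fp2_infinity f_coeffs h_coeffs p g)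

-- ===== LEMMAS AND PROOFS =====

-- Python '%' (= Int.fmod) respects congruence mod p: it only depends on the Euclidean residue.
theorem pvFmod_congr {p a b : Int} (h : a % p = b % p) : a.fmod p = b.fmod p := by
  have hd : p ∣ a ↔ p ∣ b := by
    rw [Int.dvd_iff_emod_eq_zero, Int.dvd_iff_emod_eq_zero, h]
  rw [Int.fmod_eq_emod, Int.fmod_eq_emod, h]
  simp [hd]

theorem pvFmod_emod (a p : Int) : (a.fmod p) % p = a % p := by
  rw [Int.fmod_eq_emod]
  split
  · simp
  · rw [Int.add_emod_right]
    exact Int.emod_emod_of_dvd a dvd_rfl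

-- multiplication of two omega-free elements stays omega-free
theorem pyFp2Mul_b_zero (r s p g : Int) :
    pyFp2Mul ⟨r, 0, p, g⟩ ⟨s, 0, p, g⟩ = ⟨(r * s).fmod p, 0, p, g⟩ := by
  simp [pyFp2Mul, pyFp2Init, PySem.Int.mod]

-- n >>> 1 halves the Nat value of a positive n
theorem pvShiftRight_one_toNat (n : Int) (h : 0 < n) : (n >>> (1:Nat)).toNat = n.toNat / 2 := by
  rw [pvShiftRight_one_eq n (by omega)]
  omega

-- n & 1 of a nonnegative n is its parity
theorem pvBand_one (n : Int) (h : 0 ≤ n) : PySem.Int.band n 1 = ((n.toNat % 2 : Nat) : Int) := by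
  rw [PySem.Int.band_one]
  show n.fmod 2 = _
  rw [Int.fmod_eq_emod]
  have h2 : (0:Int) ≤ 2 := by omega
  simp only [h2, true_or, if_true, add_zero]
  omega

-- the square-and-multiply loop on omega-free elements computes r * s^n mod p
theorem pyFp2PowLoop_b_zero (p g : Int) : ∀ (N : Nat) (n r s : Int), n.toNat ≤ N → r.fmod p = r →
    pyFp2PowLoop ⟨r, 0, p, g⟩ ⟨s, 0, p, g⟩ n = ⟨(r * s ^ n.toNat).fmod p, 0, p, g⟩ := by
  intro N
  induction N with
  | zero =>
    intro n r s hN hr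
    rw [pyFp2PowLoop]
    have hn : ¬ 0 < n := by omega
    rw [show n.toNat = 0 by omega]
    simp [hn, hr]
  | succ N ih =>
    intro n r s hN hr
    rw [pyFp2PowLoop]
    by_cases hn : 0 < n
    · simp only [hn, dite_true]
      rw [pyFp2Mul_b_zero, pyFp2Mul_b_zero]
      rw [show (if PySem.Int.band n 1 ≠ 0 then (⟨(r * s).fmod p, 0, p, g⟩ : PyFp2) else ⟨r, 0, p, g⟩)
            = ⟨if PySem.Int.band n 1 ≠ 0 then (r * s).fmod p else r, 0, p, g⟩ from by split <;> rfl]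
      have hk : (n >>> (1:Nat)).toNat ≤ N := by
        have := pyShiftRight_one_toNat_lt n hn
        omega
      have hr' : (if PySem.Int.band n 1 ≠ 0 then (r * s).fmod p else r).fmod p
          = (if PySem.Int.band n 1 ≠ 0 then (r * s).fmod p else r) := by
        split
        · exact Int.fmod_fmod _ _
        · exact hr
      rw [ih (n >>> (1:Nat)) _ ((s * s).fmod p) hk hr']
      have hmk : (n >>> (1:Nat)).toNat = n.toNat / 2 := pvShiftRight_one_toNat n hn
      rw [PyFp2.mk.injEq]
      refine ⟨?_, rfl, rfl, rfl⟩
      apply pvFmod_congr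
      have hsp : ((s * s).fmod p) ^ (n >>> (1:Nat)).toNat % p = (s * s) ^ (n >>> (1:Nat)).toNat % p :=
        Int.ModEq.pow _ (pvFmod_emod (s * s) p)
      rw [Int.mul_emod, hsp, ← Int.mul_emod]
      rw [pvBand_one n (by omega), hmk]
      by_cases hpar : n.toNat % 2 = 0
      · rw [hpar]
        simp only [Nat.cast_zero, ne_eq, not_true_eq_false, if_false]
        rw [show s * s = s ^ 2 from by ring, ← pow_mul,
            show 2 * (n.toNat / 2) = n.toNat from by omega]
      · rw [if_pos (Nat.cast_ne_zero.mpr hpar)]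
        rw [Int.mul_emod, pvFmod_emod, ← Int.mul_emod]
        rw [show r * s * (s * s) ^ (n.toNat / 2) = r * (s ^ 2) ^ (n.toNat / 2) * s from by ring,
            ← pow_mul]
        rw [show r * s ^ (2 * (n.toNat / 2)) * s = r * s ^ (2 * (n.toNat / 2) + 1) from by ring,
            show 2 * (n.toNat / 2) + 1 = n.toNat from by omega]
    · rw [show n.toNat = 0 by omega]
      simp [hn, hr]

-- Fp2.__pow__ on an omega-free element, nonnegative exponent
theorem pyFp2Pow_b_zero (c p g e : Int) (he : 0 ≤ e) (hc : c.fmod p = c) :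
    pyFp2Pow ⟨c, 0, p, g⟩ e = ⟨(c ^ e.toNat).fmod p, 0, p, g⟩ := by
  unfold pyFp2Pow
  by_cases h0 : e = 0
  · subst h0
    simp [pyFp2Init, PySem.Int.mod, Int.zero_fmod]
  · by_cases h1 : e = 1
    · subst h1
      simp [h0, hc]
    · simp only [h0, h1, if_false]
      rw [show pyFp2Init 1 0 (PyFp2.mk c 0 p g).p (PyFp2.mk c 0 p g).g = ⟨(1:Int).fmod p, 0, p, g⟩ from by
            simp [pyFp2Init, PySem.Int.mod]]
      rw [pyFp2PowLoop_b_zero p g e.toNat e ((1:Int).fmod p) c (le_refl _) (Int.fmod_fmod 1 p)]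
      rw [PyFp2.mk.injEq]
      refine ⟨?_, rfl, rfl, rfl⟩
      apply pvFmod_congr
      rw [Int.mul_emod, pvFmod_emod, ← Int.mul_emod, one_mul]

-- the two leading-coefficient accumulations agree
theorem pvFoldl_if_add_eq_sum_filterMap {α : Type} (l : List α) (P : α → Bool) (f : α → Int) :
    ∀ acc : Int, l.foldl (fun a x => if P x then a + f x else a) acc
      = acc + (l.filterMap (fun x => if P x then some (f x) else none)).sum := by
  induction l with
  | nil => intro acc; simp
  | cons x t ih =>
    intro acc
    by_cases h : P x
    · simp [h, ih, add_assoc]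
    · simp [h, ih]

-- degree-of-a-dict: A's guarded max equals B's max-with-default
theorem pvDegEq (d : PySem.Dict Int Int) :
    (if d.size ≠ 0 then (PySem.List.max? d.keys (fun k => k)).getD 0 else 0)
      = PySem.List.maxD d.keys (fun k => k) 0 := by
  by_cases h : d.size = 0
  · have hk : d.keys = [] := by
      simp only [PySem.Dict.keys, PySem.Dict.size] at *
      simp [List.length_eq_zero_iff.mp h]
    rw [hk]
    have hm : (PySem.List.max? ([] : List Int) (fun k => k)) = none := rfl
    simp [h, PySem.List.maxD, hm]
  · simp [h, PySem.List.maxD]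

-- Source B's recursive powmod computes the canonical residue of c^n mod m (n ≥ 0)
theorem bPowMod_eq (c m : Int) : ∀ (N : Nat) (n : Int), n.toNat ≤ N → 0 ≤ n →
    bPowMod c n m = (c ^ n.toNat).fmod m := by
  intro N
  induction N with
  | zero =>
    intro n hN hn
    rw [bPowMod, dif_pos (by omega : n ≤ 0), show n.toNat = 0 by omega]
    simp [PySem.Int.mod]
  | succ N ih =>
    intro n hN hn
    rw [bPowMod]
    by_cases h0 : n ≤ 0
    · rw [dif_pos h0, show n.toNat = 0 by omega]
      simp [PySem.Int.mod]
    · rw [dif_neg h0]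
      have hfd : PySem.Int.floordiv n 2 = n / 2 := PySem.Int.floordiv_eq_ediv_of_pos (by omega)
      have hrec := ih (PySem.Int.floordiv n 2) (by rw [hfd]; omega) (by rw [hfd]; omega)
      dsimp only []
      rw [hrec]
      have hhalf : (PySem.Int.floordiv n 2).toNat = n.toNat / 2 := by rw [hfd]; omega
      have hmod2 : PySem.Int.mod n 2 = ((n.toNat % 2 : Nat) : Int) := by
        rw [PySem.Int.mod_eq_emod_of_pos (by omega)]
        omega
      have hsq : PySem.Int.mod ((c ^ (PySem.Int.floordiv n 2).toNat).fmod m *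
            (c ^ (PySem.Int.floordiv n 2).toNat).fmod m) m = (c ^ (2 * (n.toNat / 2))).fmod m := by
        apply pvFmod_congr
        rw [hhalf, Int.mul_emod, pvFmod_emod, ← Int.mul_emod, ← pow_add,
            show n.toNat / 2 + n.toNat / 2 = 2 * (n.toNat / 2) from by omega]
      rw [hsq, hmod2]
      by_cases hpar : n.toNat % 2 = 0
      · rw [hpar]
        simp only [Nat.cast_zero, ne_eq, not_true_eq_false, if_false]
        rw [show 2 * (n.toNat / 2) = n.toNat from by omega]
      · rw [if_pos (by exact_mod_cast hpar)]
        apply pvFmod_congr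
        rw [Int.mul_emod, pvFmod_emod, ← Int.mul_emod, ← pow_succ,
            show 2 * (n.toNat / 2) + 1 = n.toNat from by omega]

-- ===== VERDICT (by name: the statement is the Claim_ definition above) =====
theorem count_fp2_infinity_spec : Claim_equal_count_fp2_infinity := by
  intro f_coeffs h_coeffs p g _ hp
  unfold Spec_count_fp2_infinity
  unfold count_fp2_infinity count_fp2_infinity_alt
  dsimp only []
  rw [pvDegEq, pvDegEq]
  set hd := PySem.Dict.ofList h_coeffs with hhd
  set fd := PySem.Dict.ofList f_coeffs with hfd
  set E := max (PySem.List.maxD fd.keys (fun k => k) 0) (2 * PySem.List.maxD hd.keys (fun k => k) 0) with hE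
  rcases PySem.Int.mod_two_eq E with h2 | h2
  · rw [if_neg (show ¬ PySem.Int.mod E 2 = 1 from by rw [h2]; omega),
        if_neg (show ¬ PySem.Int.mod E 2 ≠ 0 from by rw [h2]; omega)]
    rw [pvFoldl_if_add_eq_sum_filterMap, zero_add]
    set L := 4 * PySem.Dict.getD fd E 0 + (hd.items.filterMap (fun ici =>
        if hd.contains (E - ici.1) then some (ici.2 * PySem.Dict.getD hd (E - ici.1) 0) else none)).sum with hL
    by_cases hL0 : L = 0
    · rw [if_pos hL0, if_pos hL0]
    · rw [if_neg hL0, if_neg hL0]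
      have hlv : pyFp2Init (PySem.Int.mod L p) 0 p g = ⟨L.fmod p, 0, p, g⟩ := by
        simp [pyFp2Init, PySem.Int.mod]
      rw [hlv]
      by_cases hc : PySem.Int.mod L p = 0
      · rw [if_pos (by simp [pyFp2IsZero]; exact hc), if_pos hc]
      · have hcf : L.fmod p ≠ 0 := hc
        rw [if_neg (by simp [pyFp2IsZero]; exact hcf), if_neg hc]
        have hpp : 0 < p * p := mul_self_pos.mpr hp
        have hexp : (0:Int) ≤ PySem.Int.floordiv (p * p - 1) 2 := by
          rw [PySem.Int.floordiv_eq_ediv_of_pos (by omega)]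
          exact Int.ediv_nonneg (by omega) (by omega)
        -- both sides reduce to the canonical residue of c^((p²-1)//2) mod p
        have hsq : pyFp2IsSquare ⟨L.fmod p, 0, p, g⟩
            = ((L.fmod p ^ (PySem.Int.floordiv (p * p - 1) 2).toNat).fmod p == 1) := by
          unfold pyFp2IsSquare
          rw [if_neg (show ¬ pyFp2IsZero ⟨L.fmod p, 0, p, g⟩ = true from by simp [pyFp2IsZero, hcf])]
          dsimp only []
          rw [pyFp2Pow_b_zero (L.fmod p) p g _ hexp (Int.fmod_fmod L p)]
          simp
        rw [hsq, show PySem.Int.mod L p = L.fmod p from rfl, bPowMod_eq (L.fmod p) p (PySem.Int.floordiv (p * p - 1) 2).toNat _ (le_refl _) hexp]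
        by_cases hone : (L.fmod p ^ (PySem.Int.floordiv (p * p - 1) 2).toNat).fmod p = 1 <;>
          simp [hone]
  · rw [if_pos h2, if_pos (show PySem.Int.mod E 2 ≠ 0 from by rw [h2]; omega)]
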